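-- pv_equiv track=rewrite | github.com/yuvarajaug-ctrl/sketch-to-code-GenAI-IDE | services/keyword_engine.py | _best_keyword_match
-- ===== SOURCE A (Python) =====
-- from typing import List, Optional, Dict, Tuple
--
-- def _best_keyword_match(phrase: str, keyword_list: List[str]) -> Optional[str]:
--     """
--     Return the best keyword from keyword_list that matches phrase.
--     """
--     phrase = phrase.lower().strip()
--
--     # 1. Exact match
--     for kw in keyword_list:
--         if kw.lower() == phrase:
--             return kw
--
--     # 2. Exact word match (e.g., phrase 'password' matches 'confirm password')
--     phrase_words = set([w for w in phrase.split() if len(w) > 2])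
--     word_matches = []
--
--     if phrase_words:
--         for kw in keyword_list:
--             kw_words = set(kw.lower().split())
--             if phrase_words.intersection(kw_words):
--                 word_matches.append(kw)
--
--     if word_matches:
--         # Prefer the closer length match
--         return min(word_matches, key=lambda k: abs(len(k) - len(phrase)))
--
--     # 3. Substring match (robust)
--     # Only if phrase is long enough (prevents 'e' -> 'confirm password')
--     if len(phrase) >= 4:
--         sub_matches = []
--         for kw in keyword_list:
--             kw_l = kw.lower()
--             if phrase in kw_l or kw_l in phrase:
--                 sub_matches.append(kw)
--         if sub_matches:
--             return min(sub_matches, key=lambda k: abs(len(k) - len(phrase)))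
--
--     return None
-- ===== SOURCE B (Python) =====
-- from typing import List, Optional
--
-- def _best_keyword_match(phrase: str, keyword_list: List[str]) -> Optional[str]:
--     """Single pass: return the first exact match immediately; otherwise keep a
--     running first-minimum candidate per tier (word overlap, then substring)."""
--     p = phrase.lower().strip()
--     pw = set(w for w in p.split() if len(w) > 2)
--     word_best = None  # (key, kw) with first-minimum tie-breaking
--     sub_best = None
--     for kw in keyword_list:
--         kl = kw.lower()
--         if kl == p:
--             return kw
--         key = abs(len(kw) - len(p))
--         if pw and not pw.isdisjoint(kl.split()):
--             if word_best is None or key < word_best[0]: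
--                 word_best = (key, kw)
--         if len(p) >= 4 and (p in kl or kl in p):
--             if sub_best is None or key < sub_best[0]:
--                 sub_best = (key, kw)
--     if word_best is not None:
--         return word_best[1]
--     if sub_best is not None:
--         return sub_best[1]
--     return None
-- ===== Notes on version B (the rewrite author's own statement) =====
-- stated objective: alternative
-- what changed: Replaces A's three separate scans (exact loop, word-match list + min, substring list + min) by a single pass over keyword_list that early-returns on the first exact match and maintains one running first-minimum candidate per tier, resolved by priority after the pass.
import Mathlib
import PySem

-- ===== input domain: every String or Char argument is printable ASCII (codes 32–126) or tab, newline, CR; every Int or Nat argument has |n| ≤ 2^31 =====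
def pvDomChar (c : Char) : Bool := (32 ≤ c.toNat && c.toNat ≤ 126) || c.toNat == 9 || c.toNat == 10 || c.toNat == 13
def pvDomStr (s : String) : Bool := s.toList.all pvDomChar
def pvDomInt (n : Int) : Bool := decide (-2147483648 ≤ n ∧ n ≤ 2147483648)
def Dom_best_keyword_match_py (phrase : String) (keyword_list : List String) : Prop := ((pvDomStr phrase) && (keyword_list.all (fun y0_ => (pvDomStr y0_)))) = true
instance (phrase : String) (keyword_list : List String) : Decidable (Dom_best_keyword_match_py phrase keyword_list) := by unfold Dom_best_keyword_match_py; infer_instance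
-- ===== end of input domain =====

-- B replaces A's three separate scans by one pass that early-returns on an exact match and
-- keeps a running first-minimum candidate per tier (objective: alternative decomposition).


-- ===== PORT A =====
-- A's tier-1 loop: return the first kw with kw.lower() == phrase
def pvExactFind (p : String) : List String → Option String
  | [] => none
  | kw :: rest => if PySem.Str.lower kw == p then some kw else pvExactFind p rest

def best_keyword_match_py (phrase : String) (keyword_list : List String) : Option String :=
  let p := PySem.Str.strip (PySem.Str.lower phrase)
  match pvExactFind p keyword_list with
  | some kw => some kw
  | none =>
    let phrase_words : PySem.Set String :=
      PySem.Set.ofList ((PySem.Str.split₀ p).filter (fun w => 2 < PySem.Str.len w))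
    let word_matches : List String :=
      if phrase_words.isEmpty = false then
        keyword_list.foldl (fun acc kw =>
          if (PySem.Set.inter phrase_words
                (PySem.Set.ofList (PySem.Str.split₀ (PySem.Str.lower kw)))).isEmpty = false
          then acc ++ [kw] else acc) []
      else []
    match PySem.List.min? word_matches (fun k => |PySem.Str.len k - PySem.Str.len p|) with
    | some m => some m
    | none =>
      if 4 ≤ PySem.Str.len p then
        let sub_matches : List String := keyword_list.foldl (fun acc kw =>
          let kw_l := PySem.Str.lower kw
          if PySem.Str.isIn p kw_l || PySem.Str.isIn kw_l p then acc ++ [kw] else acc) []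
        match PySem.List.min? sub_matches (fun k => |PySem.Str.len k - PySem.Str.len p|) with
        | some m => some m
        | none => none
      else none

-- ===== PORT B =====
-- running first-minimum update: keep the stored candidate unless the new key is strictly smaller
def pvStepMin (key : Int) (kw : String) (acc : Option (Int × String)) : Option (Int × String) :=
  match acc with
  | none => some (key, kw)
  | some (k0, w0) => if key < k0 then some (key, kw) else some (k0, w0)

-- B's single pass: early return on exact match, else update the two tier accumulators
def pvLoopB (p : String) (pw : PySem.Set String) :
    List String → Option (Int × String) → Option (Int × String) → Option String
  | [], wb, sb =>
    (match wb with
     | some (_, k) => some k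
     | none =>
       match sb with
       | some (_, k) => some k
       | none => none)
  | kw :: rest, wb, sb =>
    let kl := PySem.Str.lower kw
    if kl == p then some kw
    else
      let key := |PySem.Str.len kw - PySem.Str.len p|
      let wb' := if (!pw.isEmpty) && !(PySem.Set.isdisjoint pw (PySem.Str.split₀ kl))
                 then pvStepMin key kw wb else wb
      let sb' := if decide (4 ≤ PySem.Str.len p) && (PySem.Str.isIn p kl || PySem.Str.isIn kl p)
                 then pvStepMin key kw sb else sb
      pvLoopB p pw rest wb' sb'

def best_keyword_match_py_alt (phrase : String) (keyword_list : List String) : Option String :=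
  let p := PySem.Str.strip (PySem.Str.lower phrase)
  let pw : PySem.Set String :=
    PySem.Set.ofList ((PySem.Str.split₀ p).filter (fun w => 2 < PySem.Str.len w))
  pvLoopB p pw keyword_list none none

-- ===== PRECONDITION & SPEC =====
def Spec_best_keyword_match_py (phrase : String) (keyword_list : List String) (out : Option String) : Prop := out = best_keyword_match_py_alt phrase keyword_list
instance (phrase : String) (keyword_list : List String) (out : Option String) : Decidable (Spec_best_keyword_match_py phrase keyword_list out) := by unfold Spec_best_keyword_match_py; infer_instance

-- ===== CLAIM (what is proved, stated in full; the proofs are below) =====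
def Claim_equal_best_keyword_match_py : Prop := ∀ (phrase : String) (keyword_list : List String), Dom_best_keyword_match_py phrase keyword_list → Spec_best_keyword_match_py phrase keyword_list (best_keyword_match_py phrase keyword_list)

-- ===== LEMMAS AND PROOFS =====

-- B's word predicate
def pvPredW (pw : PySem.Set String) (kw : String) : Bool :=
  (!pw.isEmpty) && !(PySem.Set.isdisjoint pw (PySem.Str.split₀ (PySem.Str.lower kw)))

-- B's substring predicate
def pvPredS (p kw : String) : Bool :=
  decide (4 ≤ PySem.Str.len p) &&
    (PySem.Str.isIn p (PySem.Str.lower kw) || PySem.Str.isIn (PySem.Str.lower kw) p)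

-- truthiness of A's set intersection = negated isdisjoint (B's form)
lemma pv_inter_isdisjoint (pw : PySem.Set String) (ws : List String) :
    (PySem.Set.inter pw (PySem.Set.ofList ws)).isEmpty = PySem.Set.isdisjoint pw ws := by
  rw [Bool.eq_iff_iff]
  simp [PySem.Set.inter, PySem.Set.isdisjoint, List.isEmpty_iff,
        List.filter_eq_nil_iff, PySem.Set.contains, PySem.Set.mem_ofList]

-- a head element beaten by the next element drops out of Python's min
lemma pv_min2_lt (key : String → Int) (m kw : String) (xs : List String)
    (hk : key kw < key m) :
    PySem.List.min? (m :: kw :: xs) key = PySem.List.min? (kw :: xs) key := by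
  simp [PySem.List.min?, hk]

-- a head element not beaten by the next element absorbs it
lemma pv_min2_ge (key : String → Int) (m kw : String) (xs : List String)
    (hk : ¬ key kw < key m) :
    PySem.List.min? (m :: kw :: xs) key = PySem.List.min? (m :: xs) key := by
  simp [PySem.List.min?, hk]

-- one tier's inline running-minimum fold computes min? of the filtered list (seeded by a.toList)
lemma pv_fold_min (pred : String → Bool) (key : String → Int) :
    ∀ (l : List String) (a : Option String),
      l.foldl (fun acc kw => if pred kw then pvStepMin (key kw) kw acc else acc)
          (a.map (fun k => (key k, k)))
        = (PySem.List.min? (a.toList ++ l.filter pred) key).map (fun k => (key k, k)) := by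
  intro l
  induction l with
  | nil =>
    intro a
    cases a with
    | none => rfl
    | some m => simp [PySem.List.min?]
  | cons kw rest ih =>
    intro a
    by_cases h : pred kw = true
    · cases a with
      | none => simpa [h, pvStepMin] using ih (some kw)
      | some m =>
        by_cases hk : key kw < key m
        · have hmin := pv_min2_lt key m kw (rest.filter pred) hk
          simpa [h, pvStepMin, hk, hmin] using ih (some kw)
        · have hmin := pv_min2_ge key m kw (rest.filter pred) hk
          simpa [h, pvStepMin, hk, hmin] using ih (some m)
    · simp only [List.foldl_cons, List.filter_cons, h, Bool.false_eq_true, if_false]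
      exact ih a

-- the fold starting empty IS Python's min over the filtered list
lemma pv_min?_eq (pred : String → Bool) (key : String → Int) (l : List String) :
    l.foldl (fun acc kw => if pred kw then pvStepMin (key kw) kw acc else acc) none
      = (PySem.List.min? (l.filter pred) key).map (fun k => (key k, k)) := by
  simpa using pv_fold_min pred key l none

-- A's guarded append-loop over tier 2 builds exactly the pvPredW-filtered list
lemma pv_wordmatches (pw : PySem.Set String) (l : List String) :
    (if pw.isEmpty = false then
        l.foldl (fun acc kw =>
          if (PySem.Set.inter pw
                (PySem.Set.ofList (PySem.Str.split₀ (PySem.Str.lower kw)))).isEmpty = false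
          then acc ++ [kw] else acc) []
      else []) = l.filter (pvPredW pw) := by
  by_cases he : pw.isEmpty = true
  · simp [he, pvPredW, List.filter_eq_nil_iff]
  · have he' : pw.isEmpty = false := Bool.eq_false_iff.mpr he
    rw [if_pos he']
    have hcond : ∀ (X : Bool) (acc : List String) (kw : String),
        (if X = false then acc ++ [kw] else acc) = (if (!X) = true then acc ++ [kw] else acc) := by
      intro X acc kw; cases X <;> rfl
    simp only [hcond]
    rw [PySem.List.foldl_append_if
      (fun kw => !(PySem.Set.inter pw
        (PySem.Set.ofList (PySem.Str.split₀ (PySem.Str.lower kw)))).isEmpty)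
      (fun kw => kw)]
    simp only [List.nil_append, List.map_id_fun', id]
    exact List.filter_congr (fun kw _ => by simp [pvPredW, he', pv_inter_isdisjoint])

-- A's append-loop over tier 3 builds the substring-filtered list
lemma pv_submatches (p : String) (l : List String) :
    l.foldl (fun acc kw =>
        let kw_l := PySem.Str.lower kw
        if PySem.Str.isIn p kw_l || PySem.Str.isIn kw_l p then acc ++ [kw] else acc) []
      = l.filter (fun kw =>
          PySem.Str.isIn p (PySem.Str.lower kw) || PySem.Str.isIn (PySem.Str.lower kw) p) := by
  simpa using PySem.List.foldl_append_if
    (fun kw => PySem.Str.isIn p (PySem.Str.lower kw) || PySem.Str.isIn (PySem.Str.lower kw) p)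
    (fun kw => kw) l []

-- loop characterization: B's pass = first exact match, else the two running minima resolved
lemma pv_loop_eq (p : String) (pw : PySem.Set String) :
    ∀ (l : List String) (wb sb : Option (Int × String)),
      pvLoopB p pw l wb sb =
        match pvExactFind p l with
        | some kw => some kw
        | none =>
          match l.foldl (fun acc kw => if pvPredW pw kw then
              pvStepMin (|PySem.Str.len kw - PySem.Str.len p|) kw acc else acc) wb with
          | some (_, k) => some k
          | none =>
            match l.foldl (fun acc kw => if pvPredS p kw then
                pvStepMin (|PySem.Str.len kw - PySem.Str.len p|) kw acc else acc) sb with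
            | some (_, k) => some k
            | none => none := by
  intro l
  induction l with
  | nil => intro wb sb; rfl
  | cons kw rest ih =>
    intro wb sb
    by_cases h : (PySem.Str.lower kw == p) = true
    · simp [pvLoopB, pvExactFind, h]
    · simp only [pvLoopB, pvExactFind, h, Bool.false_eq_true, if_false, List.foldl_cons]
      rw [ih]
      rfl

-- ===== VERDICT (by name: the statement is the Claim_ definition above) =====
theorem best_keyword_match_py_spec : Claim_equal_best_keyword_match_py := by
  intro phrase l _
  unfold Spec_best_keyword_match_py
  simp only [best_keyword_match_py, best_keyword_match_py_alt]
  rw [pv_loop_eq]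
  cases hE : pvExactFind (PySem.Str.strip (PySem.Str.lower phrase)) l with
  | some kw => rfl
  | none =>
    rw [pv_min?_eq (pvPredW (PySem.Set.ofList
          ((PySem.Str.split₀ (PySem.Str.strip (PySem.Str.lower phrase))).filter
            (fun w => 2 < PySem.Str.len w))))
        (fun kw => |PySem.Str.len kw - PySem.Str.len (PySem.Str.strip (PySem.Str.lower phrase))|) l,
      pv_min?_eq (pvPredS (PySem.Str.strip (PySem.Str.lower phrase)))
        (fun kw => |PySem.Str.len kw - PySem.Str.len (PySem.Str.strip (PySem.Str.lower phrase))|) l,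
      pv_wordmatches]
    cases hW : PySem.List.min?
        (l.filter (pvPredW (PySem.Set.ofList
          ((PySem.Str.split₀ (PySem.Str.strip (PySem.Str.lower phrase))).filter
            (fun w => 2 < PySem.Str.len w)))))
        (fun k => |PySem.Str.len k - PySem.Str.len (PySem.Str.strip (PySem.Str.lower phrase))|) with
    | some m => rfl
    | none =>
      by_cases hp : 4 ≤ PySem.Str.len (PySem.Str.strip (PySem.Str.lower phrase))
      · rw [if_pos hp, pv_submatches]
        have h4 : decide (4 ≤ PySem.Str.len (PySem.Str.strip (PySem.Str.lower phrase))) = true :=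
          decide_eq_true hp
        have hfs : l.filter (pvPredS (PySem.Str.strip (PySem.Str.lower phrase)))
            = l.filter (fun kw =>
                PySem.Str.isIn (PySem.Str.strip (PySem.Str.lower phrase)) (PySem.Str.lower kw)
                || PySem.Str.isIn (PySem.Str.lower kw) (PySem.Str.strip (PySem.Str.lower phrase))) :=
          List.filter_congr (fun kw _ => by simp only [pvPredS, h4, Bool.true_and])
        rw [hfs]
        cases hS : PySem.List.min?
            (l.filter (fun kw =>
                PySem.Str.isIn (PySem.Str.strip (PySem.Str.lower phrase)) (PySem.Str.lower kw)
                || PySem.Str.isIn (PySem.Str.lower kw) (PySem.Str.strip (PySem.Str.lower phrase))))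
            (fun k => |PySem.Str.len k - PySem.Str.len (PySem.Str.strip (PySem.Str.lower phrase))|) with
        | some m => rfl
        | none => rfl
      · rw [if_neg hp]
        have h4 : decide (4 ≤ PySem.Str.len (PySem.Str.strip (PySem.Str.lower phrase))) = false :=
          decide_eq_false hp
        have hnil : l.filter (pvPredS (PySem.Str.strip (PySem.Str.lower phrase))) = [] :=
          List.filter_eq_nil_iff.mpr (fun a _ => by
            simp only [pvPredS, h4, Bool.false_and, Bool.false_eq_true, not_false_eq_true])
        rw [hnil]
        rfl
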